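-- pv_equiv track=rewrite | github.com/Krish-bhardwaj/PROJECT_EULER | P54.py | paired_number
-- ===== SOURCE A (Python) =====
-- from collections import Counter
--
-- def paired_number(l):
--     repeated = (Counter(l) - Counter(set(l))).keys()
--     rating = {'A': 14, 'K': 13, 'Q': 12, 'J': 11, 'T': 10, '9': 9,
--               '8': 8, '7': 7, '6': 6, '5': 5, '4': 4, '3': 3, '2': 2, '1': 1}
--     highest = 0
--     for i in repeated:
--         if rating[i] > highest:
--             highest = rating[i]
--     return highest
-- ===== SOURCE B (Python) =====
-- def paired_number(l):
--     rating = {'A': 14, 'K': 13, 'Q': 12, 'J': 11, 'T': 10, '9': 9,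
--               '8': 8, '7': 7, '6': 6, '5': 5, '4': 4, '3': 3, '2': 2, '1': 1}
--     highest = 0
--     seen = set()
--     for card in l:
--         if card in seen:
--             highest = max(highest, rating[card])
--         else:
--             seen.add(card)
--     return highest
-- ===== Notes on version B (the rewrite author's own statement) =====
-- stated objective: simpler
-- what changed: Replaces the Counter(l) - Counter(set(l)) construction plus a separate max loop over its keys by one pass over l with a seen-set and a running max, looking up the rating only on repeat occurrences (so single invalid symbols still never raise).
import Mathlib
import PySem

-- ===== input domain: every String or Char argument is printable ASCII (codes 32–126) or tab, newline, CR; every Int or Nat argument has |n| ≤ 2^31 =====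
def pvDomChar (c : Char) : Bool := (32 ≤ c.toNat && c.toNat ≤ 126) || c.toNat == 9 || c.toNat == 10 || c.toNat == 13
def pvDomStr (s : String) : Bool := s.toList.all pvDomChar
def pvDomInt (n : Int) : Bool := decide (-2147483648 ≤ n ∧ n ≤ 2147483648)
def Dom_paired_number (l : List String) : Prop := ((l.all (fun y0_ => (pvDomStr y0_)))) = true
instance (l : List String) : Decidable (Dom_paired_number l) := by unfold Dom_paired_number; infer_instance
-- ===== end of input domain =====

-- B replaces A's Counter(l) - Counter(set(l)) arithmetic by a single pass with a seen-set
-- and a running max (simpler decomposition, same O(n) cost).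

-- ===== PORT A =====
-- rating dict (both Pythons define the same literal dict)
def pvRating : PySem.Dict String Int :=
  PySem.Dict.ofList [("A",14),("K",13),("Q",12),("J",11),("T",10),("9",9),
                     ("8",8),("7",7),("6",6),("5",5),("4",4),("3",3),("2",2),("1",1)]

def paired_number (l : List String) : Int :=
  -- Counter(l) - Counter(set(l)): subtract counts key-wise, keep the keys of the left
  -- counter whose remainder is positive, in the left counter's key order
  -- (hand port of Counter.__sub__; exact here since all counts involved are positive)
  let c1 := PySem.Dict.counter l
  let c2 : PySem.Dict String Int := PySem.Dict.counter (PySem.Set.ofList l)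
  let repeated := (c1.items.filter (fun p => decide (0 < p.2 - c2.getD p.1 0))).map (fun p => p.1)
  -- rating[i] raises KeyError for a key off the dict; Pre_ excludes that, so getD 0 is never the value used
  repeated.foldl (fun highest i => if pvRating.getD i 0 > highest then pvRating.getD i 0 else highest) 0

-- ===== PORT B =====
def paired_number_alt (l : List String) : Int :=
  (l.foldl (fun st card =>
      if PySem.Set.contains st.1 card then (st.1, max st.2 (pvRating.getD card 0))
      else (PySem.Set.add st.1 card, st.2))
    ((PySem.Set.empty : PySem.Set String), (0 : Int))).2

-- ===== PRECONDITION & SPEC =====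
-- Pre_ excludes exactly the inputs on which A raises KeyError: a string occurring at least
-- twice in l that is not one of the fourteen card symbols (B raises KeyError there too).
def Pre_paired_number (l : List String) : Prop :=
  ∀ x ∈ l, 2 ≤ l.count x →
    x ∈ (["A","K","Q","J","T","9","8","7","6","5","4","3","2","1"] : List String)
instance (l : List String) : Decidable (Pre_paired_number l) := by
  unfold Pre_paired_number; infer_instance

def pvWitness_paired_number : List String := ["A", "7", "A", "x", "7"]

def Spec_paired_number (l : List String) (out : Int) : Prop := out = paired_number_alt l
instance (l : List String) (out : Int) : Decidable (Spec_paired_number l out) := by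
  unfold Spec_paired_number; infer_instance

-- ===== CLAIM (what is proved, stated in full; the proofs are below) =====
def Claim_equal_paired_number : Prop :=
  ∀ (l : List String), Dom_paired_number l → Pre_paired_number l →
    Spec_paired_number l (paired_number l)

-- ===== LEMMAS AND PROOFS =====

-- upper bound for a running max
theorem pv_foldl_max_le (f : String → Int) (s : List String) :
    ∀ (a c : Int), a ≤ c → (∀ x ∈ s, f x ≤ c) →
      s.foldl (fun h k => max h (f k)) a ≤ c := by
  induction s with
  | nil => intro a c ha _; simpa using ha
  | cons x t ih =>
      intro a c ha hf
      simp only [List.foldl_cons]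
      exact ih _ _ (by have := hf x (by simp); omega) (fun y hy => hf y (by simp [hy]))

-- a running max depends only on which elements occur
theorem pv_foldl_max_eq_of_mem_iff (f : String → Int) (a : Int) (s t : List String)
    (hmem : ∀ k, k ∈ s ↔ k ∈ t) :
    s.foldl (fun h k => max h (f k)) a = t.foldl (fun h k => max h (f k)) a := by
  apply le_antisymm
  · exact pv_foldl_max_le f s a _ (PySem.List.le_foldl_max_int t f a).1
      (fun x hx => (PySem.List.le_foldl_max_int t f a).2 x ((hmem x).mp hx))
  · exact pv_foldl_max_le f t a _ (PySem.List.le_foldl_max_int s f a).1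
      (fun x hx => (PySem.List.le_foldl_max_int s f a).2 x ((hmem x).mpr hx))

-- the occurrences at which B's loop takes a max
def pvDups (seen : PySem.Set String) : List String → List String
  | [] => []
  | x :: t => if x ∈ seen then x :: pvDups seen t else pvDups (PySem.Set.add seen x) t

theorem pvB_loop (l : List String) (seen : PySem.Set String) (h : Int) :
    (l.foldl (fun st card =>
        if PySem.Set.contains st.1 card then (st.1, max st.2 (pvRating.getD card 0))
        else (PySem.Set.add st.1 card, st.2)) (seen, h)).2
      = (pvDups seen l).foldl (fun a k => max a (pvRating.getD k 0)) h := by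
  induction l generalizing seen h with
  | nil => rfl
  | cons x t ih =>
      have hstep : (if PySem.Set.contains (seen, h).1 x then ((seen, h).1, max (seen, h).2 (pvRating.getD x 0))
            else (PySem.Set.add (seen, h).1 x, (seen, h).2))
          = if x ∈ seen then (seen, max h (pvRating.getD x 0)) else (PySem.Set.add seen x, h) := by
        simp
      rw [List.foldl_cons, hstep]
      simp only [pvDups]
      by_cases hm : x ∈ seen
      · rw [if_pos hm, if_pos hm, List.foldl_cons]
        exact ih seen (max h (pvRating.getD x 0))
      · rw [if_neg hm, if_neg hm]
        exact ih (PySem.Set.add seen x) h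

theorem mem_pvDups (l : List String) (seen : PySem.Set String) (k : String) :
    k ∈ pvDups seen l ↔ k ∈ l ∧ (k ∈ seen ∨ 2 ≤ l.count k) := by
  induction l generalizing seen with
  | nil => simp [pvDups]
  | cons x t ih =>
      simp only [pvDups]
      by_cases hkx : k = x
      · subst hkx
        by_cases hm : k ∈ seen
        · simp [hm, List.count_cons_self, ih]
        · rw [if_neg hm, ih]
          have hadd : k ∈ PySem.Set.add seen k := by
            rw [PySem.Set.mem_add]; right; rfl
          constructor
          · rintro ⟨hk, _⟩
            have : 1 ≤ t.count k := List.count_pos_iff.mpr hk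
            exact ⟨by simp, Or.inr (by rw [List.count_cons_self]; omega)⟩
          · rintro ⟨_, h2⟩
            rcases h2 with h2 | h2
            · exact absurd h2 hm
            · have : 1 ≤ t.count k := by rw [List.count_cons_self] at h2; omega
              exact ⟨List.count_pos_iff.mp this, Or.inl hadd⟩
      · have hcount : (x :: t).count k = t.count k := by
          simp [Ne.symm hkx]
        by_cases hm : x ∈ seen
        · rw [if_pos hm]
          simp only [List.mem_cons, hkx, false_or, hcount, ih]
        · rw [if_neg hm, ih, hcount]
          have : k ∈ PySem.Set.add seen x ↔ k ∈ seen := by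
            rw [PySem.Set.mem_add]
            simp [hkx]
          rw [this]
          simp [hkx]

theorem mem_repeated (l : List String) (k : String) :
    (k ∈ ((PySem.Dict.counter l).items.filter
        (fun p => decide (0 < p.2 - (PySem.Dict.counter (PySem.Set.ofList l) : PySem.Dict String Int).getD p.1 0))).map
        (fun p => p.1))
      ↔ k ∈ l ∧ 2 ≤ l.count k := by
  have h1 : ∀ k0, k0 ∈ PySem.Set.ofList l → (PySem.Set.ofList l).count k0 = 1 := by
    intro k0 hk0
    exact List.count_eq_one_of_mem (PySem.Set.nodup_ofList l) hk0
  simp only [List.mem_map, List.mem_filter, PySem.Dict.items_counter, decide_eq_true_eq,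
    PySem.Dict.getD_counter]
  constructor
  · rintro ⟨p, ⟨hp, hpos⟩, rfl⟩
    obtain ⟨k0, hk0, rfl⟩ := hp
    dsimp only at hpos ⊢
    have hkl : k0 ∈ l := (PySem.Set.mem_ofList l k0).mp hk0
    rw [h1 k0 hk0] at hpos
    exact ⟨hkl, by omega⟩
  · rintro ⟨hkl, hcnt⟩
    have hk0 : k ∈ PySem.Set.ofList l := (PySem.Set.mem_ofList l k).mpr hkl
    refine ⟨(k, (l.count k : Int)), ⟨⟨k, hk0, rfl⟩, ?_⟩, rfl⟩
    rw [h1 k hk0]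
    omega

theorem pv_main (l : List String) : paired_number l = paired_number_alt l := by
  have hA : paired_number l
      = (((PySem.Dict.counter l).items.filter
          (fun p => decide (0 < p.2 - (PySem.Dict.counter (PySem.Set.ofList l) : PySem.Dict String Int).getD p.1 0))).map
          (fun p => p.1)).foldl
          (fun highest i => if pvRating.getD i 0 > highest then pvRating.getD i 0 else highest) 0 := rfl
  rw [hA, paired_number_alt, pvB_loop]
  have hfg : ∀ (acc : Int) (x : String),
      x ∈ (((PySem.Dict.counter l).items.filter
          (fun p => decide (0 < p.2 - (PySem.Dict.counter (PySem.Set.ofList l) : PySem.Dict String Int).getD p.1 0))).map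
          (fun p => p.1)) →
      (if pvRating.getD x 0 > acc then pvRating.getD x 0 else acc) = max acc (pvRating.getD x 0) := by
    intro acc x _
    simp only [gt_iff_lt, max_def]
    split_ifs <;> omega
  rw [PySem.List.foldl_congr_mem _ _ _ _ hfg]
  apply pv_foldl_max_eq_of_mem_iff
  intro k
  rw [mem_repeated, mem_pvDups]
  simp [PySem.Set.empty]

-- ===== VERDICT (by name: the statement is the Claim_ definition above) =====
theorem paired_number_spec : Claim_equal_paired_number := by
  intro l _ _
  unfold Spec_paired_number
  exact pv_main l
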